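-- pv_equiv track=rewrite | github.com/milind7705/dsa | mixed/token_replace.py | token_replace
-- ===== SOURCE A (Python) =====
-- def token_replace(s, tokens):
--     # Use two pointers strategy. First pointer is at first index and next is at i + 1
--     # They key here is i will point to first $ and j will point to last dollar of the token
--     # Once that is met, do the pointers adjustment
--     i = 0
--     j = i + 1
--     output = ""
--     # Only loop is till i
--     while i < len(s):
--         if s[i] != "$":
--             output += s[i]
--             i += 1
--             j = i + 1
--         elif s[j] != "$":
--             j = j + 1
--         else:
--             token = s[i: j + 1]
--             output += tokens[token]
--             i = j + 1
--             j = i + 1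
--     return output
-- ===== SOURCE B (Python) =====
-- def token_replace(s, tokens):
--     # Jump between '$' delimiters with str.find instead of scanning char by char.
--     out = ""
--     pos = 0
--     while True:
--         start = s.find('$', pos)
--         if start == -1:
--             return out + s[pos:]
--         end = s.find('$', start + 1)
--         if end == -1:
--             # unmatched '$': keep the tail as-is (A raises IndexError here; outside Pre_)
--             return out + s[pos:]
--         out += s[pos:start] + tokens[s[start:end + 1]]
--         pos = end + 1
-- ===== Notes on version B (the rewrite author's own statement) =====
-- stated objective: faster
-- what changed: A scans char by char with two manually-adjusted index pointers and per-char immutable-string appends; B keeps one cursor and jumps straight between '$' delimiters with str.find, copying whole slices at once.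
import Mathlib
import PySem

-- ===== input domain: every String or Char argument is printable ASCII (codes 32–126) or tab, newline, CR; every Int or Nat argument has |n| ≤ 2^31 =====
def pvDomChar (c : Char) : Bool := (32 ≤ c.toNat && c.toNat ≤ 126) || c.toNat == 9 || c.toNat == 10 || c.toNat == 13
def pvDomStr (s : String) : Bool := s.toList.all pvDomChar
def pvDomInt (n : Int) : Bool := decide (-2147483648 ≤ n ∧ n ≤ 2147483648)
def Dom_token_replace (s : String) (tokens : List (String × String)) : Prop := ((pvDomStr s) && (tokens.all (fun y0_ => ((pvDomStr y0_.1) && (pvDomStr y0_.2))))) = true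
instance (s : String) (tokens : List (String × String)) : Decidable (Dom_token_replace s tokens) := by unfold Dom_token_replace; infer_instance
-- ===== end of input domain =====

-- B replaces A's char-by-char two-pointer scan by a cursor that jumps between '$'
-- delimiters with str.find and copies whole slices (objective: idiomatic).
-- Equivalence is claimed on Pre_ (the inputs where A returns normally).

-- ===== PORT A =====
-- while loop with two Int pointers i, j; fuel 2*len+1 only makes the recursion total
-- (proved sufficient inside Pre_); on the Python error paths (IndexError on s[j],
-- KeyError on the dict lookup) the loop bails out — those inputs are outside Pre_.
def pvLoopA (cs : List Char) (tokens : List (String × String)) :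
    Nat → Int → Int → List Char → List Char
  | 0, _, _, out => out
  | fuel+1, i, j, out =>
    if i < (cs.length : Int) then
      match PySem.List.pyGet? cs i with
      | none => out
      | some ci =>
        if ci ≠ '$' then
          pvLoopA cs tokens fuel (i + 1) (i + 2) (out ++ [ci])
        else
          match PySem.List.pyGet? cs j with
          | none => out   -- IndexError in Python
          | some cj =>
            if cj ≠ '$' then
              pvLoopA cs tokens fuel i (j + 1) out
            else
              match tokens.lookup (String.ofList (PySem.List.slice cs (some i) (some (j + 1)))) with
              | none => out   -- KeyError in Python
              | some v => pvLoopA cs tokens fuel (j + 1) (j + 2) (out ++ v.toList)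
    else out

def token_replace (s : String) (tokens : List (String × String)) : String :=
  String.ofList (pvLoopA s.toList tokens (2 * s.toList.length + 1) 0 1 [])

-- ===== PORT B =====
-- cursor pos; str.find ported as PySem.Chars.findFrom; fuel len+1 only makes it total.
def pvLoopB (cs : List Char) (tokens : List (String × String)) :
    Nat → Int → List Char → List Char
  | 0, _, out => out
  | fuel+1, pos, out =>
    let start := PySem.Chars.findFrom cs ['$'] pos
    if start = -1 then out ++ PySem.List.slice cs (some pos) none
    else
      let stop := PySem.Chars.findFrom cs ['$'] (start + 1)
      if stop = -1 then out ++ PySem.List.slice cs (some pos) none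
      else
        match tokens.lookup (String.ofList (PySem.List.slice cs (some start) (some (stop + 1)))) with
        | none => out   -- KeyError in Python
        | some v =>
          pvLoopB cs tokens fuel (stop + 1)
            (out ++ PySem.List.slice cs (some pos) (some start) ++ v.toList)

def token_replace_alt (s : String) (tokens : List (String × String)) : String :=
  String.ofList (pvLoopB s.toList tokens (s.toList.length + 1) 0 [])

-- ===== PRECONDITION & SPEC =====
-- split a char list at every '$' (shape description used by Pre_, not a port)
def pvSplitD : List Char → List (List Char)
  | [] => [[]]
  | c :: rest =>
    if c = '$' then [] :: pvSplitD rest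
    else
      match pvSplitD rest with
      | [] => [[c]]
      | p :: ps => (c :: p) :: ps

-- the parts at odd positions (the texts between the 1st/2nd, 3rd/4th, … '$')
def pvInsides : List (List Char) → List (List Char)
  | _ :: t :: rest => t :: pvInsides rest
  | _ => []

def pvKeyOK (tokens : List (String × String)) (t : List Char) : Bool :=
  (tokens.lookup (String.ofList ('$' :: (t ++ ['$'])))).isSome

-- Pre_ excludes exactly the inputs where A raises: an odd number of '$' (IndexError
-- from the off-the-end scan) or a '$token$' absent from tokens (KeyError).
def Pre_token_replace (s : String) (tokens : List (String × String)) : Prop :=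
  ((pvSplitD s.toList).length % 2 == 1
    && (pvInsides (pvSplitD s.toList)).all (pvKeyOK tokens)) = true

instance (s : String) (tokens : List (String × String)) : Decidable (Pre_token_replace s tokens) := by
  unfold Pre_token_replace; infer_instance

def pvWitness_token_replace : String × (List (String × String)) :=
  ("x$a$y$$z", [("$a$", "1"), ("$$", "")])

def Spec_token_replace (s : String) (tokens : List (String × String)) (out : String) : Prop := out = token_replace_alt s tokens
instance (s : String) (tokens : List (String × String)) (out : String) : Decidable (Spec_token_replace s tokens out) := by unfold Spec_token_replace; infer_instance

-- ===== CLAIM (what is proved, stated in full; the proofs are below) =====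
def Claim_equal_token_replace : Prop := ∀ (s : String) (tokens : List (String × String)), Dom_token_replace s tokens → Pre_token_replace s tokens → Spec_token_replace s tokens (token_replace s tokens)

-- ===== LEMMAS AND PROOFS =====

-- the common reference value: glue the split parts back, replacing odd parts
def pvGlue (tokens : List (String × String)) : List (List Char) → List Char
  | [] => []
  | [p] => p
  | p :: t :: rest =>
    p ++ ((tokens.lookup (String.ofList ('$' :: (t ++ ['$'])))).getD "").toList ++ pvGlue tokens rest

def pvOK (tokens : List (String × String)) (d : List Char) : Bool :=
  (pvSplitD d).length % 2 == 1 && (pvInsides (pvSplitD d)).all (pvKeyOK tokens)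

theorem pvSplitD_no_dollar (d : List Char) (h : '$' ∉ d) : pvSplitD d = [d] := by
  induction d with
  | nil => rfl
  | cons c rest ih =>
    simp only [List.mem_cons, not_or] at h
    rw [pvSplitD, if_neg (fun hc => h.1 hc.symm), ih h.2]

theorem pvSplitD_ne_nil (d : List Char) : pvSplitD d ≠ [] := by
  induction d with
  | nil => simp [pvSplitD]
  | cons c rest ih =>
    rw [pvSplitD]
    split
    · simp
    · cases hr : pvSplitD rest <;> simp

theorem pvSplitD_split (mid tail : List Char) (h : '$' ∉ mid) :
    pvSplitD (mid ++ '$' :: tail) = mid :: pvSplitD tail := by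
  induction mid with
  | nil => simp [pvSplitD]
  | cons c rest ih =>
    simp only [List.mem_cons, not_or] at h
    rw [List.cons_append, pvSplitD, if_neg (fun hc => h.1 hc.symm),
      ih h.2]

theorem pvSingleton_prefix_drop (d : List Char) (c : Char) (k : Nat) :
    [c] <+: d.drop k ↔ d[k]? = some c := by
  rw [← List.head?_drop]
  constructor
  · rintro ⟨t, ht⟩
    rw [← ht]; rfl
  · intro hh
    cases hd : d.drop k with
    | nil => rw [hd] at hh; simp at hh
    | cons x xs =>
      rw [hd] at hh
      simp only [List.head?_cons, Option.some.injEq] at hh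
      exact ⟨xs, by simp [hh]⟩

theorem pvFind_no_dollar (d : List Char) (h : '$' ∉ d) : PySem.Chars.find d ['$'] = -1 := by
  rw [PySem.Chars.find_eq_neg_one_iff]
  intro hinf
  exact h (hinf.subset (by simp))

theorem pvFind_split (mid tail : List Char) (h : '$' ∉ mid) :
    PySem.Chars.find (mid ++ '$' :: tail) ['$'] = (mid.length : Int) := by
  have hnn : 0 ≤ PySem.Chars.find (mid ++ '$' :: tail) ['$'] := by
    rw [PySem.Chars.find_nonneg_iff]
    exact ⟨mid, tail, by simp⟩
  obtain ⟨hpre, hmin⟩ := PySem.Chars.find_spec hnn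
  set f := PySem.Chars.find (mid ++ '$' :: tail) ['$'] with hf
  rw [pvSingleton_prefix_drop] at hpre
  have hge : ¬ f.toNat < mid.length := by
    intro hlt
    rw [List.getElem?_append_left hlt] at hpre
    exact h (List.mem_of_getElem? hpre)
  have hle : ¬ mid.length < f.toNat := by
    intro hlt
    have := hmin mid.length hlt
    rw [pvSingleton_prefix_drop, List.getElem?_append_right le_rfl] at this
    simp at this
  omega

theorem pvMemSplit (d : List Char) (h : '$' ∈ d) :
    ∃ mid tail, '$' ∉ mid ∧ d = mid ++ '$' :: tail := by
  induction d with
  | nil => simp at h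
  | cons c rest ih =>
    by_cases hc : c = '$'
    · exact ⟨[], rest, by simp, by rw [hc]; rfl⟩
    · have hr : '$' ∈ rest := by
        rcases List.mem_cons.mp h with h1 | h1
        · exact absurd h1.symm hc
        · exact h1
      obtain ⟨mid, tail, hm, hd⟩ := ih hr
      exact ⟨c :: mid, tail, by
        simp only [List.mem_cons, not_or]
        exact ⟨fun h1 => hc h1.symm, hm⟩, by rw [hd]; rfl⟩

-- '$' ∈ tail when pvSplitD tail has even (hence ≠ 1) length
theorem pvDollarOfEven (tail : List Char) (h : (pvSplitD tail).length % 2 = 0) : '$' ∈ tail := by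
  by_contra hn
  rw [pvSplitD_no_dollar tail hn] at h
  simp at h

theorem pvLoopB_glue (cs : List Char) (tokens : List (String × String)) :
    ∀ n d pos out fuel, d.length ≤ n → cs.drop pos = d → pos + d.length = cs.length →
    pvOK tokens d = true → d.length + 1 ≤ fuel →
    pvLoopB cs tokens fuel (pos : Int) out = out ++ pvGlue tokens (pvSplitD d) := by
  intro n
  induction n using Nat.strong_induction_on with
  | _ n ih =>
    intro d pos out fuel hn hdrop hlen hok hfuel
    obtain ⟨fuel, rfl⟩ : ∃ f', fuel = f' + 1 := ⟨fuel - 1, by omega⟩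
    rw [pvLoopB]
    have hposle : pos ≤ cs.length := by omega
    have hfind := PySem.Chars.findFrom_natCast cs ['$'] pos hposle
    rw [hdrop] at hfind
    by_cases hdol : '$' ∈ d
    · obtain ⟨mid, tail, hmid, rfl⟩ := pvMemSplit d hdol
      rw [pvFind_split mid tail hmid, if_neg (by omega)] at hfind
      rw [pvSplitD_split mid tail hmid]
      simp only [List.length_append, List.length_cons] at hn hlen hfuel
      unfold pvOK at hok
      rw [pvSplitD_split mid tail hmid] at hok
      simp only [Bool.and_eq_true, beq_iff_eq, List.length_cons] at hok
      have htl : '$' ∈ tail := pvDollarOfEven tail (by omega)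
      obtain ⟨mid2, tail2, hmid2, rfl⟩ := pvMemSplit tail htl
      rw [pvSplitD_split mid2 tail2 hmid2] at hok ⊢
      simp only [List.length_append, List.length_cons] at hn hlen hfuel
      -- evaluate start
      rw [hfind, if_neg (by omega)]
      have hcast1 : (pos : Int) + (mid.length : Int) + 1 = ((pos + mid.length + 1 : Nat) : Int) := by
        push_cast; ring
      have hdrop2 : cs.drop (pos + mid.length + 1) = mid2 ++ '$' :: tail2 := by
        have h1 : (cs.drop pos).drop (mid.length + 1) = cs.drop (pos + mid.length + 1) := by
          rw [List.drop_drop, Nat.add_assoc]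
        rw [← h1, hdrop,
          show mid ++ '$' :: (mid2 ++ '$' :: tail2) = (mid ++ ['$']) ++ (mid2 ++ '$' :: tail2) by simp,
          List.drop_left' (by simp)]
      have hfind2 := PySem.Chars.findFrom_natCast cs ['$'] (pos + mid.length + 1) (by omega)
      rw [hdrop2, pvFind_split mid2 tail2 hmid2, if_neg (by omega)] at hfind2
      rw [hcast1, hfind2, if_neg (by omega)]
      -- the token slice is '$' :: mid2 ++ ['$']
      have hcast2 : ((pos + mid.length + 1 : Nat) : Int) + (mid2.length : Int) + 1
          = ((pos + mid.length + 1 + mid2.length + 1 : Nat) : Int) := by push_cast; ring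
      have htok : PySem.List.slice cs (some ((pos : Int) + (mid.length : Int)))
          (some (((pos + mid.length + 1 : Nat) : Int) + (mid2.length : Int) + 1))
          = '$' :: (mid2 ++ ['$']) := by
        rw [hcast2, show (pos : Int) + (mid.length : Int) = ((pos + mid.length : Nat) : Int) by push_cast; omega,
          PySem.List.slice_natCast]
        have hd3 : cs.drop (pos + mid.length) = '$' :: (mid2 ++ '$' :: tail2) := by
          have h1 : (cs.drop pos).drop mid.length = cs.drop (pos + mid.length) := by
            rw [List.drop_drop]
          rw [← h1, hdrop, List.drop_left' rfl]
        rw [hd3, show pos + mid.length + 1 + mid2.length + 1 - (pos + mid.length) = mid2.length + 2 by omega]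
        simp [List.take_append, List.take_of_length_le]
      rw [htok]
      -- the looked-up token is present (from pvOK's insides clause)
      obtain ⟨hparity, hokall⟩ := hok
      have hins : pvInsides (mid :: mid2 :: pvSplitD tail2) = mid2 :: pvInsides (pvSplitD tail2) := rfl
      rw [hins, List.all_cons, Bool.and_eq_true] at hokall
      obtain ⟨hk2, hkrest⟩ := hokall
      unfold pvKeyOK at hk2
      obtain ⟨v, hv⟩ := Option.isSome_iff_exists.mp hk2
      rw [show ('$' :: (mid2 ++ ['$'])) = '$' :: mid2 ++ ['$'] by simp] at hv ⊢
      rw [hv]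
      -- recurse on tail2
      have hslice : PySem.List.slice cs (some (pos : Int)) (some ((pos : Int) + (mid.length : Int)))
          = mid := by
        rw [show (pos : Int) + (mid.length : Int) = ((pos + mid.length : Nat) : Int) by push_cast; omega,
          PySem.List.slice_natCast, hdrop, show pos + mid.length - pos = mid.length by omega,
          List.take_left' rfl]
      have hdrop3 : cs.drop (pos + mid.length + 1 + mid2.length + 1) = tail2 := by
        have h1 : (cs.drop (pos + mid.length + 1)).drop (mid2.length + 1)
            = cs.drop (pos + mid.length + 1 + mid2.length + 1) := by
          rw [List.drop_drop]; congr 1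
        rw [← h1, hdrop2,
          show mid2 ++ '$' :: tail2 = (mid2 ++ ['$']) ++ tail2 by simp,
          List.drop_left' (by simp)]
      have hok2 : pvOK tokens tail2 = true := by
        unfold pvOK
        simp only [Bool.and_eq_true, beq_iff_eq]
        simp only [List.length_cons] at hparity
        exact ⟨by omega, hkrest⟩
      have hmn : tail2.length < n := by omega
      have hlen2 : pos + mid.length + 1 + mid2.length + 1 + tail2.length = cs.length := by omega
      have hfuel2 : tail2.length + 1 ≤ fuel := by omega
      have hrec := ih tail2.length hmn tail2 (pos + mid.length + 1 + mid2.length + 1)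
        (out ++ PySem.List.slice cs (some (pos : Int)) (some ((pos : Int) + (mid.length : Int))) ++ v.toList)
        fuel le_rfl hdrop3 hlen2 hok2 hfuel2
      show pvLoopB cs tokens fuel (((pos + mid.length + 1 : Nat) : Int) + (mid2.length : Int) + 1)
          (out ++ PySem.List.slice cs (some (pos : Int)) (some ((pos : Int) + (mid.length : Int))) ++ v.toList)
        = out ++ pvGlue tokens (mid :: mid2 :: pvSplitD tail2)
      rw [hcast2, hrec, hslice, pvGlue]
      rw [show ('$' :: (mid2 ++ ['$'])) = '$' :: mid2 ++ ['$'] from rfl, hv]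
      simp
    · rw [pvFind_no_dollar d hdol, if_pos rfl] at hfind
      rw [hfind, if_pos rfl, PySem.List.slice_from_natCast, hdrop,
        pvSplitD_no_dollar d hdol, pvGlue]

theorem pvLoopA_scan (cs : List Char) (tokens : List (String × String)) :
    ∀ mid scanned tail i out fuel v, cs.drop i = '$' :: (scanned ++ mid ++ '$' :: tail) →
    i + 1 + scanned.length + mid.length + 1 + tail.length = cs.length →
    '$' ∉ mid →
    tokens.lookup (String.ofList ('$' :: ((scanned ++ mid) ++ ['$']))) = some v →
    pvLoopA cs tokens (mid.length + 1 + fuel) (i : Int) ((i : Int) + 1 + scanned.length) out =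
      pvLoopA cs tokens fuel ((i + scanned.length + mid.length + 2 : Nat) : Int)
        ((i + scanned.length + mid.length + 3 : Nat) : Int) (out ++ v.toList) := by
  intro mid
  induction mid with
  | nil =>
    intro scanned tail i out fuel v hdrop hlen hmid hv
    have hilt : i < cs.length := by omega
    have hgi : cs[i]? = some '$' := by
      have := @List.getElem?_drop Char cs i 0
      rw [hdrop] at this
      simpa using this.symm
    have hgj : cs[i + 1 + scanned.length]? = some '$' := by
      have h0 := @List.getElem?_drop Char cs i (1 + scanned.length)
      rw [hdrop] at h0
      rw [show i + (1 + scanned.length) = i + 1 + scanned.length by omega] at h0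
      rw [← h0, show ('$' :: (scanned ++ [] ++ '$' :: tail)) = ('$' :: scanned) ++ '$' :: tail by simp]
      rw [List.getElem?_append_right (by simp [Nat.add_comm])]
      simp [Nat.add_comm]
    have hv' : List.lookup (String.ofList ('$' :: (scanned ++ ['$']))) tokens = some v := by
      rw [← hv]; congr 2; simp
    have htok : PySem.List.slice cs (some (i : Int)) (some (((i + 1 + scanned.length : Nat) : Int) + 1))
        = '$' :: (scanned ++ ['$']) := by
      rw [show ((i + 1 + scanned.length : Nat) : Int) + 1 = ((i + scanned.length + 2 : Nat) : Int) by push_cast; omega,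
        PySem.List.slice_natCast, hdrop, show i + scanned.length + 2 - i = scanned.length + 2 by omega]
      simp [List.take_append, List.take_of_length_le]
    rw [show ([] : List Char).length + 1 + fuel = fuel + 1 by simp [Nat.add_comm]]
    rw [pvLoopA, if_pos (by exact_mod_cast hilt)]
    simp only [PySem.List.pyGet?_natCast, hgi]
    rw [if_neg (by simp)]
    rw [show (i : Int) + 1 + ((scanned.length : Nat) : Int) = ((i + 1 + scanned.length : Nat) : Int) by push_cast; omega]
    simp only [PySem.List.pyGet?_natCast, hgj]
    rw [if_neg (by simp)]
    simp only [htok, hv']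
    rw [show ((i + 1 + scanned.length : Nat) : Int) + 1 = ((i + scanned.length + ([] : List Char).length + 2 : Nat) : Int) by push_cast; simp; omega]
    rw [show ((i + 1 + scanned.length : Nat) : Int) + 2 = ((i + scanned.length + ([] : List Char).length + 3 : Nat) : Int) by push_cast; simp; omega]
  | cons m mid ih =>
    intro scanned tail i out fuel v hdrop hlen hmid hv
    have hilt : i < cs.length := by
      simp only [List.length_cons] at hlen; omega
    have hgi : cs[i]? = some '$' := by
      have := @List.getElem?_drop Char cs i 0
      rw [hdrop] at this
      simpa using this.symm
    have hgj : cs[i + 1 + scanned.length]? = some m := by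
      have h0 := @List.getElem?_drop Char cs i (1 + scanned.length)
      rw [hdrop] at h0
      rw [show i + (1 + scanned.length) = i + 1 + scanned.length by omega] at h0
      rw [← h0, show ('$' :: (scanned ++ (m :: mid) ++ '$' :: tail)) = ('$' :: scanned) ++ (m :: (mid ++ '$' :: tail)) by simp]
      rw [List.getElem?_append_right (by simp [Nat.add_comm])]
      simp [Nat.add_comm]
    have hm : m ≠ '$' := by
      intro hmm
      exact hmid (by rw [← hmm]; exact List.mem_cons_self ..)
    rw [show (m :: mid).length + 1 + fuel = (mid.length + 1 + fuel) + 1 by simp; omega]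
    rw [pvLoopA, if_pos (by exact_mod_cast hilt)]
    simp only [PySem.List.pyGet?_natCast, hgi]
    rw [if_neg (by simp)]
    rw [show (i : Int) + 1 + ((scanned.length : Nat) : Int) = ((i + 1 + scanned.length : Nat) : Int) by push_cast; omega]
    simp only [PySem.List.pyGet?_natCast, hgj]
    rw [if_pos (by simp [hm])]
    have hrec := ih (scanned ++ [m]) tail i out fuel v
      (by rw [hdrop]; simp) (by simp at hlen ⊢; omega)
      (fun hc => hmid (List.mem_cons_of_mem _ hc))
      (by rw [← hv]; congr 2; simp)
    rw [show ((i + 1 + scanned.length : Nat) : Int) + 1 = (i : Int) + 1 + (((scanned ++ [m]).length : Nat) : Int) by push_cast; simp; omega]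
    rw [hrec]
    congr 2 <;> simp <;> omega

theorem pvInsides_cons (x y : List Char) (ps : List (List Char)) :
    pvInsides (x :: ps) = pvInsides (y :: ps) := by
  cases ps <;> rfl

theorem pvSplitD_cons_ne (c : Char) (d : List Char) (hc : c ≠ '$') :
    ∃ p ps, pvSplitD d = p :: ps ∧ pvSplitD (c :: d) = (c :: p) :: ps := by
  cases hd : pvSplitD d with
  | nil => exact absurd hd (pvSplitD_ne_nil d)
  | cons p ps =>
    refine ⟨p, ps, rfl, ?_⟩
    rw [pvSplitD, if_neg hc, hd]

theorem pvGlue_cons (tokens : List (String × String)) (c : Char) (p : List Char)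
    (ps : List (List Char)) :
    pvGlue tokens ((c :: p) :: ps) = c :: pvGlue tokens (p :: ps) := by
  match ps with
  | [] => rfl
  | t :: rest => rfl

theorem pvLoopA_glue (cs : List Char) (tokens : List (String × String)) :
    ∀ n d i out fuel, d.length ≤ n → cs.drop i = d → i + d.length = cs.length →
    pvOK tokens d = true → 2 * d.length + 1 ≤ fuel →
    pvLoopA cs tokens fuel (i : Int) ((i : Int) + 1) out = out ++ pvGlue tokens (pvSplitD d) := by
  intro n
  induction n using Nat.strong_induction_on with
  | _ n ih =>
    intro d i out fuel hn hdrop hlen hok hfuel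
    obtain ⟨fuel, rfl⟩ : ∃ f', fuel = f' + 1 := ⟨fuel - 1, by omega⟩
    match d, hdrop, hn, hlen, hok, hfuel with
    | [], hdrop, hn, hlen, hok, hfuel =>
      rw [pvLoopA, if_neg (by simp at hlen; omega), pvSplitD, pvGlue, List.append_nil]
    | c :: d', hdrop, hn, hlen, hok, hfuel =>
      simp only [List.length_cons] at hn hlen hfuel
      have hilt : i < cs.length := by omega
      have hgi : cs[i]? = some c := by
        have := @List.getElem?_drop Char cs i 0
        rw [hdrop] at this
        simpa using this.symm
      rcases eq_or_ne c '$' with rfl | hc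
      · -- token case: decompose d' around its first '$'
        unfold pvOK at hok
        rw [show pvSplitD ('$' :: d') = [] :: pvSplitD d' from by rw [pvSplitD, if_pos rfl]] at hok
        simp only [Bool.and_eq_true, beq_iff_eq, List.length_cons] at hok
        have hd2 : '$' ∈ d' := pvDollarOfEven d' (by omega)
        obtain ⟨mid, tail, hmid, rfl⟩ := pvMemSplit d' hd2
        rw [pvSplitD_split mid tail hmid] at hok
        obtain ⟨hparity, hokall⟩ := hok
        have hins : pvInsides ([] :: mid :: pvSplitD tail) = mid :: pvInsides (pvSplitD tail) := rfl
        rw [hins, List.all_cons, Bool.and_eq_true] at hokall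
        obtain ⟨hk1, hkrest⟩ := hokall
        unfold pvKeyOK at hk1
        obtain ⟨v, hv⟩ := Option.isSome_iff_exists.mp hk1
        obtain ⟨f2, hf2⟩ : ∃ f2, fuel + 1 = mid.length + 1 + f2 := by
          refine ⟨fuel - mid.length, ?_⟩
          simp only [List.length_append, List.length_cons] at hfuel
          omega
        rw [hf2]
        have hscan := pvLoopA_scan cs tokens mid [] tail i out f2 v
          (by rw [hdrop]; simp) (by simp only [List.length_append, List.length_cons, List.length_nil] at hlen ⊢; try omega)
          hmid (by simpa using hv)
        simp only [List.length_nil, Nat.cast_zero, add_zero] at hscan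
        rw [hscan]
        have hdrop3 : cs.drop (i + mid.length + 2) = tail := by
          have h1 : (cs.drop i).drop (mid.length + 2) = cs.drop (i + mid.length + 2) := by
            rw [List.drop_drop, Nat.add_assoc]
          rw [← h1, hdrop,
            show ('$' :: (mid ++ '$' :: tail)) = (('$' :: mid) ++ ['$']) ++ tail by simp,
            List.drop_left' (by simp)]
        have hrec := ih tail.length (by simp only [List.length_append, List.length_cons] at hn; omega)
          tail (i + mid.length + 2) (out ++ v.toList) f2 le_rfl hdrop3
          (by simp only [List.length_append, List.length_cons] at hlen; omega)
          (by unfold pvOK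
              simp only [Bool.and_eq_true, beq_iff_eq]
              simp only [List.length_cons] at hparity
              exact ⟨by omega, hkrest⟩)
          (by simp only [List.length_append, List.length_cons] at hfuel; omega)
        rw [show ((i + mid.length + 3 : Nat) : Int) = ((i + mid.length + 2 : Nat) : Int) + 1 by push_cast; omega,
          hrec]
        rw [show pvSplitD ('$' :: (mid ++ '$' :: tail)) = [] :: mid :: pvSplitD tail from by
          rw [pvSplitD, if_pos rfl, pvSplitD_split mid tail hmid]]
        rw [pvGlue]
        simp [hv]
      · -- copy case
        rw [pvLoopA, if_pos (by exact_mod_cast hilt)]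
        simp only [PySem.List.pyGet?_natCast, hgi]
        rw [if_pos (by simp [hc])]
        have hdrop' : cs.drop (i + 1) = d' := by
          have h1 : (cs.drop i).drop 1 = cs.drop (i + 1) := by rw [List.drop_drop]
          rw [← h1, hdrop]; rfl
        obtain ⟨p, ps, hp, hcp⟩ := pvSplitD_cons_ne c d' hc
        have hok' : pvOK tokens d' = true := by
          unfold pvOK at hok ⊢
          rw [hcp] at hok
          rw [hp]
          simpa [pvInsides_cons (c :: p) p ps] using hok
        have hrec := ih d'.length (by omega) d' (i + 1) (out ++ [c]) fuel le_rfl hdrop'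
          (by omega) hok' (by omega)
        rw [show (i : Int) + 2 = ((i + 1 : Nat) : Int) + 1 by push_cast; omega]
        rw [show (i : Int) + 1 = ((i + 1 : Nat) : Int) by push_cast; omega]
        rw [hrec, hcp, hp, pvGlue_cons]
        simp

-- ===== VERDICT (by name: the statement is the Claim_ definition above) =====
theorem token_replace_spec : Claim_equal_token_replace := by
  intro s tokens _ hpre
  unfold Pre_token_replace at hpre
  unfold Spec_token_replace token_replace token_replace_alt
  have hA := pvLoopA_glue s.toList tokens s.toList.length s.toList 0 [] (2 * s.toList.length + 1)
    le_rfl rfl (by omega) (by exact hpre) (by omega)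
  have hB := pvLoopB_glue s.toList tokens s.toList.length s.toList 0 [] (s.toList.length + 1)
    le_rfl rfl (by omega) (by exact hpre) (by omega)
  simp only [Nat.cast_zero, zero_add] at hA hB
  rw [hA, hB]
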